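-- pv_equiv track=rewrite | github.com/rozhkoandrew/Andrew | Контрольная работа 5е зададние.py | sort_by_row
-- ===== SOURCE A (Python) =====
-- def sort_by_row(table):
--     final_lst = []
--     count_n = 0
--     for x in range(0,6):
--         lst = []
--         final_lst.append(lst)
--         for row in table:
--             #final_lst.append(lst)
--             for idx in range(0,len(row)):
--                 if idx == count_n:
--                     lst.append(row[idx])
--         count_n += 1
--     return final_lst
-- ===== SOURCE B (Python) =====
-- def sort_by_row(table):
--     final_lst = [[] for _ in range(6)]
--     for row in table:
--         for idx in range(min(6, len(row))):
--             final_lst[idx].append(row[idx])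
--     return final_lst
-- ===== Notes on version B (the rewrite author's own statement) =====
-- stated objective: faster
-- what changed: B builds all six column lists in one pass over the table (appending row[idx] to column idx for idx < min(6, len(row))), instead of A's six separate passes each of which scans every index of every row comparing it against the current column number.
import Mathlib
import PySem

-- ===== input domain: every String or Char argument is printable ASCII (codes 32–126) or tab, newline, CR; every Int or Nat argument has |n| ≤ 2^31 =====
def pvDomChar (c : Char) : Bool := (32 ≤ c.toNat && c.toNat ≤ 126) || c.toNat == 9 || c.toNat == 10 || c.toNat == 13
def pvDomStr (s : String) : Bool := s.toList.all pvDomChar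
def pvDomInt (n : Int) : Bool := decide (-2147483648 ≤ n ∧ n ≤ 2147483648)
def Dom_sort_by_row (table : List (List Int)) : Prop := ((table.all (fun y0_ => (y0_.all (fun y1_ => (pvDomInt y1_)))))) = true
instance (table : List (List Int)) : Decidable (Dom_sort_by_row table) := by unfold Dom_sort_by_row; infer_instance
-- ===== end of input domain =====

-- B builds the six column lists in ONE pass over the table instead of A's six scanning passes; return values proved equal.

-- ===== PORT A =====
-- Python appends the fresh list object to final_lst and then mutates it in place;
-- value-wise this equals appending the fully built column list at the end of the x-iteration.
-- row[idx] is always in range (idx ∈ range(len(row))), so pyGetD is exact here.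
def sort_by_row (table : List (List Int)) : List (List Int) :=
  ((PySem.List.pyRange 0 6 1).foldl
    (fun (st : List (List Int) × Int) _x =>
      let lst := table.foldl
        (fun lst row =>
          (PySem.List.pyRange 0 (row.length : Int) 1).foldl
            (fun lst idx =>
              if idx == st.2 then lst ++ [PySem.List.pyGetD row idx 0] else lst)
            lst)
        []
      (st.1 ++ [lst], st.2 + 1))
    ([], 0)).1

-- ===== PORT B =====
def sort_by_row_alt (table : List (List Int)) : List (List Int) :=
  table.foldl
    (fun acc row =>
      (List.range (min 6 row.length)).foldl
        (fun acc idx => acc.modify idx (fun c => c ++ [row.getD idx 0])) acc)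
    (List.replicate 6 [])

-- ===== PRECONDITION & SPEC =====
def Spec_sort_by_row (table : List (List Int)) (out : List (List Int)) : Prop := out = sort_by_row_alt table
instance (table : List (List Int)) (out : List (List Int)) : Decidable (Spec_sort_by_row table out) := by unfold Spec_sort_by_row; infer_instance

-- ===== CLAIM (what is proved, stated in full; the proofs are below) =====
def Claim_equal_sort_by_row : Prop := ∀ (table : List (List Int)), Dom_sort_by_row table → Spec_sort_by_row table (sort_by_row table)

-- ===== LEMMAS AND PROOFS =====

/-- column `c` of the table: the `c`-th entry of every row long enough. -/
def pvCol (c : Nat) (table : List (List Int)) : List Int :=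
  table.filterMap (fun row => row[c]?)

lemma pvCol_cons (c : Nat) (row : List Int) (t : List (List Int)) :
    pvCol c (row :: t) = (row[c]?).toList ++ pvCol c t := by
  cases h : row[c]? <;> simp [pvCol, h]

-- A's inner idx-loop appends row[c] exactly when c < len row.
lemma a_inner (row : List Int) (c : Nat) : ∀ (n : Nat) (lst : List Int),
    (PySem.List.pyRange 0 (n : Int) 1).foldl
      (fun lst idx => if idx == (c : Int) then lst ++ [PySem.List.pyGetD row idx 0] else lst) lst
    = lst ++ (if c < n then [PySem.List.pyGetD row (c : Int) 0] else []) := by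
  intro n
  induction n with
  | zero => intro lst; simp [PySem.List.pyRange_one_eq_nil]
  | succ m ih =>
      intro lst
      have h : ((m : Int) + 1) = ((m + 1 : Nat) : Int) := by push_cast; ring
      have hr : PySem.List.pyRange 0 ((m + 1 : Nat) : Int) 1
          = PySem.List.pyRange 0 (m : Int) 1 ++ [(m : Int)] := by
        rw [← h, PySem.List.pyRange_one_succ_right (by positivity)]
      rw [hr, List.foldl_append, ih]
      by_cases hc : m = c
      · subst hc; simp
      · have hbe : ((m : Int) == (c : Int)) = false := by
          simp; omega
        simp only [List.foldl_cons, List.foldl_nil, hbe, if_false, Bool.false_eq_true]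
        by_cases hlt : c < m
        · have : c < m + 1 := by omega
          simp [hlt, this]
        · have : ¬ c < m + 1 := by omega
          simp [hlt, this]

lemma a_row_loop (c : Nat) : ∀ (table : List (List Int)) (lst : List Int),
    table.foldl
      (fun lst row =>
        (PySem.List.pyRange 0 (row.length : Int) 1).foldl
          (fun lst idx => if idx == (c : Int) then lst ++ [PySem.List.pyGetD row idx 0] else lst) lst)
      lst
    = lst ++ pvCol c table := by
  intro table
  induction table with
  | nil => intro lst; simp [pvCol]
  | cons row t ih =>
      intro lst
      rw [List.foldl_cons, a_inner row c row.length lst, ih, pvCol_cons, List.append_assoc]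
      congr 1
      by_cases h : c < row.length
      · have h1 : (c : Int) < (row.length : Int) := by exact_mod_cast h
        simp [h, PySem.List.pyGetD_eq_getElem row (c : Int) 0 (Int.natCast_nonneg c) h1]
      · simp [h]

lemma sort_by_row_eq_cols (table : List (List Int)) :
    sort_by_row table
    = [pvCol 0 table, pvCol 1 table, pvCol 2 table, pvCol 3 table, pvCol 4 table, pvCol 5 table] := by
  have hr : PySem.List.pyRange 0 6 1 = [0, 1, 2, 3, 4, 5] := by decide
  unfold sort_by_row
  rw [hr]
  simp only [List.foldl_cons, List.foldl_nil]
  have h0 := a_row_loop 0 table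
  have h1 := a_row_loop 1 table
  have h2 := a_row_loop 2 table
  have h3 := a_row_loop 3 table
  have h4 := a_row_loop 4 table
  have h5 := a_row_loop 5 table
  simp at h0 h1 h2 h3 h4 h5
  simp [h0, h1, h2, h3, h4, h5]

-- B's per-row inner loop on an explicit 6-accumulator state.
lemma b_step (row : List Int) (l0 l1 l2 l3 l4 l5 : List Int) :
    (List.range (min 6 row.length)).foldl
      (fun acc idx => acc.modify idx (fun c => c ++ [row.getD idx 0])) [l0, l1, l2, l3, l4, l5]
    = [l0 ++ (row[0]?).toList, l1 ++ (row[1]?).toList, l2 ++ (row[2]?).toList,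
       l3 ++ (row[3]?).toList, l4 ++ (row[4]?).toList, l5 ++ (row[5]?).toList] := by
  match row with
  | [] => simp
  | [a] => norm_num [List.range_succ, List.modify]
  | [a, b] => norm_num [List.range_succ, List.modify]
  | [a, b, c] => norm_num [List.range_succ, List.modify]
  | [a, b, c, d] => norm_num [List.range_succ, List.modify]
  | [a, b, c, d, e] => norm_num [List.range_succ, List.modify]
  | a :: b :: c :: d :: e :: f :: rest =>
      have hmin : min 6 (a :: b :: c :: d :: e :: f :: rest).length = 6 := by
        have hl : (a :: b :: c :: d :: e :: f :: rest).length = rest.length + 6 := by simp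
        omega
      rw [hmin]
      norm_num [List.range_succ, List.modify]

-- B's per-table loop, with the six accumulators generalized.
lemma b_loop : ∀ (table : List (List Int)) (l0 l1 l2 l3 l4 l5 : List Int),
    table.foldl
      (fun acc row =>
        (List.range (min 6 row.length)).foldl
          (fun acc idx => acc.modify idx (fun c => c ++ [row.getD idx 0])) acc)
      [l0, l1, l2, l3, l4, l5]
    = [l0 ++ pvCol 0 table, l1 ++ pvCol 1 table, l2 ++ pvCol 2 table,
       l3 ++ pvCol 3 table, l4 ++ pvCol 4 table, l5 ++ pvCol 5 table] := by
  intro table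
  induction table with
  | nil => intro l0 l1 l2 l3 l4 l5; simp [pvCol]
  | cons row t ih =>
      intro l0 l1 l2 l3 l4 l5
      rw [List.foldl_cons, b_step, ih]
      simp [pvCol_cons]

-- ===== VERDICT (by name: the statement is the Claim_ definition above) =====
theorem sort_by_row_spec : Claim_equal_sort_by_row := by
  intro table _
  unfold Spec_sort_by_row sort_by_row_alt
  have : (List.replicate 6 ([] : List Int)) = [[], [], [], [], [], []] := by decide
  rw [this, b_loop, sort_by_row_eq_cols]
  simp
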